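-- pv_equiv track=rewrite | github.com/agraharivikash/EthicalAi | app.py | find_scored_terms
-- ===== SOURCE A (Python) =====
-- def find_scored_terms(text, terms_with_weights):
--     lower = (text or "").lower()
--     matched = {}
--     total = 0
--
--     for term, (reason, weight) in terms_with_weights.items():
--         if term in lower:
--             matched[term] = reason
--             total += int(weight)
--
--     return min(100, total), matched
-- ===== SOURCE B (Python) =====
-- def find_scored_terms(text, terms_with_weights):
--     lower = (text or "").lower()
--     # one pass over the text per distinct term LENGTH: hash-set of all substrings
--     # of those lengths, then each term is a single O(1) set lookup
--     lengths = {len(term) for term in terms_with_weights}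
--     subs = {lower[i:i + n] for n in lengths for i in range(len(lower) - n + 1)}
--     hits = [(term, reason, int(weight))
--             for term, (reason, weight) in terms_with_weights.items()
--             if term in subs]
--     matched = {term: reason for term, reason, _ in hits}
--     total = sum(w for _, _, w in hits)
--     return min(100, total), matched
-- ===== Notes on version B (the rewrite author's own statement) =====
-- stated objective: faster
-- what changed: Instead of scanning the whole text once per term (one substring search per dictionary entry), B builds one hash set of all substrings of the text whose lengths occur among the terms (one pass per distinct term length), then decides each term by a single O(1) set lookup and assembles the result with a filter, a sum and a dict comprehension instead of an accumulator loop.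
import Mathlib
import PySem

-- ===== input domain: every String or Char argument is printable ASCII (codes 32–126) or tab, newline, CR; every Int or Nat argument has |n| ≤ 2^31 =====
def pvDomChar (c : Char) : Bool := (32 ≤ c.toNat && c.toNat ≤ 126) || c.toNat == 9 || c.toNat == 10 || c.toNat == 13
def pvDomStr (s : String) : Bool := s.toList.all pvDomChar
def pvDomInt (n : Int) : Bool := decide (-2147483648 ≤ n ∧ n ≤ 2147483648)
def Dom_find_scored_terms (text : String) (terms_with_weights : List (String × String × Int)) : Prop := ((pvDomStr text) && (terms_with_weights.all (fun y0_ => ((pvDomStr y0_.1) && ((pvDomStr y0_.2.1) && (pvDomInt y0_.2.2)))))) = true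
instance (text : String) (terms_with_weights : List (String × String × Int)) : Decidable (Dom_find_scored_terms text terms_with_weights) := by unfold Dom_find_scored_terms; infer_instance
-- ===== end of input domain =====

-- B replaces A's per-term scan of the text by one hash set of all substrings of the
-- relevant lengths, looked up once per term (objective: faster for many terms).

-- ===== PORT A =====
def find_scored_terms (text : String) (terms_with_weights : List (String × String × Int)) : Int × (List (String × String)) :=
  let lower := PySem.Str.lower (if text = "" then "" else text)
  let res :=
    terms_with_weights.foldl
      (fun (st : PySem.Dict String String × Int) p =>
        if PySem.Str.isIn p.1 lower then (PySem.Dict.insert st.1 p.1 p.2.1, st.2 + p.2.2)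
        else st)
      (PySem.Dict.empty, 0)
  (min 100 res.2, PySem.Dict.items res.1)

-- ===== PORT B =====
-- all substrings of `lower` whose length is `n`, as slices (Source B's inner set comprehension)
def pvSubsOfLen (lower : String) (n : Int) : List String :=
  (PySem.List.pyRange 0 (PySem.Str.len lower - n + 1) 1).map
    (fun i => PySem.Str.slice lower (some i) (some (i + n)))

def find_scored_terms_alt (text : String) (terms_with_weights : List (String × String × Int)) : Int × (List (String × String)) :=
  let lower := PySem.Str.lower (if text = "" then "" else text)
  let lengths : PySem.Set Int := PySem.Set.ofList (terms_with_weights.map (fun p => PySem.Str.len p.1))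
  let subs : PySem.Set String := PySem.Set.ofList (List.flatMap (pvSubsOfLen lower) lengths)
  let hits := terms_with_weights.filter (fun p => PySem.Set.contains subs p.1)
  let matched := hits.foldl (fun (d : PySem.Dict String String) p => PySem.Dict.insert d p.1 p.2.1) PySem.Dict.empty
  let total := (hits.map (fun p => p.2.2)).sum
  (min 100 total, PySem.Dict.items matched)

-- ===== PRECONDITION & SPEC =====
def Spec_find_scored_terms (text : String) (terms_with_weights : List (String × String × Int)) (out : Int × (List (String × String))) : Prop := out = find_scored_terms_alt text terms_with_weights
instance (text : String) (terms_with_weights : List (String × String × Int)) (out : Int × (List (String × String))) : Decidable (Spec_find_scored_terms text terms_with_weights out) := by unfold Spec_find_scored_terms; infer_instance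

-- ===== CLAIM (what is proved, stated in full; the proofs are below) =====
def Claim_equal_find_scored_terms : Prop := ∀ (text : String) (terms_with_weights : List (String × String × Int)), Dom_find_scored_terms text terms_with_weights → Spec_find_scored_terms text terms_with_weights (find_scored_terms text terms_with_weights)

-- ===== LEMMAS AND PROOFS =====

-- every substring of the relevant length is a slice in pvSubsOfLen, and conversely:
-- `t in lower` (Python) coincides with membership of t in the substring set B builds,
-- provided t's length is one of the collected lengths.
theorem pv_contains_eq_isIn (lower : String) (lens : List Int) (t : String)
    (hlen : PySem.Str.len t ∈ lens)
    (hnn : ∀ n ∈ lens, 0 ≤ n) :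
    PySem.Set.contains (PySem.Set.ofList (List.flatMap (pvSubsOfLen lower) (PySem.Set.ofList lens))) t
      = PySem.Str.isIn t lower := by
  rw [Bool.eq_iff_iff, PySem.Set.contains_iff, PySem.Set.mem_ofList, List.mem_flatMap]
  rw [PySem.Str.isIn_eq, ← PySem.Chars.exists_prefix_drop_iff_isIn]
  constructor
  · rintro ⟨n, hn, ht⟩
    rw [(PySem.Set.mem_ofList lens n : n ∈ PySem.Set.ofList lens ↔ n ∈ lens)] at hn
    unfold pvSubsOfLen at ht
    obtain ⟨i, hi, rfl⟩ := List.mem_map.mp ht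
    have hi' := PySem.List.mem_pyRange_one.mp hi
    obtain ⟨j, rfl⟩ := Int.eq_ofNat_of_zero_le hi'.1
    obtain ⟨m, rfl⟩ := Int.eq_ofNat_of_zero_le (hnn n hn)
    refine ⟨j, ?_⟩
    rw [PySem.Str.toList_slice, PySem.Chars.slice_eq_listSlice,
        PySem.List.slice_natCast_add]
    exact List.take_prefix m _
  · rintro ⟨j, hpre⟩
    have hj'le : min j lower.toList.length ≤ lower.toList.length := min_le_right _ _
    have hpre' : t.toList <+: lower.toList.drop (min j lower.toList.length) := by
      rcases le_total j lower.toList.length with hj | hj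
      · rwa [min_eq_left hj]
      · have hnil : lower.toList.drop j = [] := by
          rw [List.drop_eq_nil_iff]; omega
        have ht0 : t.toList = [] := List.prefix_nil.mp (hnil ▸ hpre)
        simp [ht0]
    have hle : t.toList.length ≤ lower.toList.length - min j lower.toList.length := by
      have := hpre'.length_le
      simpa using this
    refine ⟨(t.toList.length : Int), ?_, ?_⟩
    · rw [PySem.Set.mem_ofList]
      rwa [PySem.Str.len_eq] at hlen
    · unfold pvSubsOfLen
      rw [List.mem_map]
      refine ⟨((min j lower.toList.length : Nat) : Int), ?_, ?_⟩
      · rw [PySem.List.mem_pyRange_one, PySem.Str.len_eq]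
        constructor
        · exact_mod_cast Nat.zero_le _
        · push_cast; omega
      · rw [← String.toList_inj, PySem.Str.toList_slice, PySem.Chars.slice_eq_listSlice,
            PySem.List.slice_natCast_add]
        exact (List.prefix_iff_eq_take.mp hpre').symm

-- A's accumulator loop over the terms equals B's filter / dict-fold / sum, as soon as
-- the two membership tests agree on every term of the list.
theorem pv_loop_eq (lower : String) (c : String → Bool)
    (ts : List (String × String × Int))
    (h : ∀ p ∈ ts, PySem.Str.isIn p.1 lower = c p.1) :
    ∀ (d : PySem.Dict String String) (tot : Int),
      ts.foldl
        (fun (st : PySem.Dict String String × Int) p =>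
          if PySem.Str.isIn p.1 lower then (PySem.Dict.insert st.1 p.1 p.2.1, st.2 + p.2.2)
          else st) (d, tot)
      = ((ts.filter (fun p => c p.1)).foldl
            (fun (d : PySem.Dict String String) p => PySem.Dict.insert d p.1 p.2.1) d,
          tot + ((ts.filter (fun p => c p.1)).map (fun p => p.2.2)).sum) := by
  induction ts with
  | nil => intro d tot; simp
  | cons p ts ih =>
    intro d tot
    have hp := h p (List.mem_cons_self ..)
    have hts : ∀ q ∈ ts, PySem.Str.isIn q.1 lower = c q.1 :=
      fun q hq => h q (List.mem_cons_of_mem _ hq)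
    simp only [List.foldl_cons, List.filter_cons, hp]
    by_cases hc : c p.1 = true
    · simp only [hc, if_true, List.foldl_cons, List.map_cons, List.sum_cons]
      rw [ih hts (PySem.Dict.insert d p.1 p.2.1) (tot + p.2.2)]
      simp [add_assoc]
    · simp only [hc, if_false, Bool.false_eq_true]
      exact ih hts d tot

-- ===== VERDICT (by name: the statement is the Claim_ definition above) =====
theorem find_scored_terms_spec : Claim_equal_find_scored_terms := by
  intro text tw _
  unfold Spec_find_scored_terms
  simp only [find_scored_terms, find_scored_terms_alt]
  set lower := PySem.Str.lower (if text = "" then "" else text) with hlow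
  set lens := tw.map (fun p => PySem.Str.len p.1) with hlens
  have hnn : ∀ n ∈ lens, 0 ≤ n := by
    intro n hn
    rw [hlens] at hn
    obtain ⟨p, _, rfl⟩ := List.mem_map.mp hn
    simp [PySem.Str.len_eq]
  have h : ∀ p ∈ tw, PySem.Str.isIn p.1 lower =
      (fun x => PySem.Set.contains
        (PySem.Set.ofList (List.flatMap (pvSubsOfLen lower) (PySem.Set.ofList lens))) x) p.1 := by
    intro p hp
    exact (pv_contains_eq_isIn lower lens p.1
      (by rw [hlens]; exact List.mem_map.mpr ⟨p, hp, rfl⟩) hnn).symm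
  rw [pv_loop_eq lower _ tw h]
  simp
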